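-- pv_equiv track=rewrite | github.com/Nik314/OptIMIIstJournal | optimiist/split_log/split_log.py | _split_trace
-- ===== SOURCE A (Python) =====
-- def _split_trace(trace: list[str], A: set[str], B: set[str]) -> tuple[list[str], list[str]]:
--     relevant = [(idx, e) for idx, e in enumerate(trace) if e in A or e in B]
--     best_kept = -1
--     best_t1, best_t2 = [], []
--     for i in range(len(relevant) + 1):
--         left = [e for _, e in relevant[:i]]
--         right = [e for _, e in relevant[i:]]
--         t1 = [e for e in left if e in A]
--         t2 = [e for e in right if e in B]
--         kept = len(t1) + len(t2)
--         if kept > best_kept: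
--             best_kept = kept
--             best_t1, best_t2 = t1, t2
--     return best_t1, best_t2
-- ===== SOURCE B (Python) =====
-- def _split_trace(trace: list[str], A: set[str], B: set[str]) -> tuple[list[str], list[str]]:
--     rel = [e for e in trace if e in A or e in B]
--     # kept(i) = |A-events in rel[:i]| + |B-events in rel[i:]| differs from
--     # score(i) = |A-events in rel[:i]| - |B-events in rel[:i]| by the constant |B-events in rel|,
--     # so the first argmax of kept is the first argmax of score, found in one pass.
--     best_score, best_i, score = 0, 0, 0
--     for i, e in enumerate(rel, 1):
--         score += (e in A) - (e in B)
--         if score > best_score: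
--             best_score, best_i = score, i
--     return [e for e in rel[:best_i] if e in A], [e for e in rel[best_i:] if e in B]
-- ===== Notes on version B (the rewrite author's own statement) =====
-- stated objective: faster
-- what changed: A rebuilds both filtered halves for every split point (quadratic); B notes kept(i) differs from the prefix score |A-hits|-|B-hits| by a constant, so one left-to-right pass maintaining a running score finds the same first argmax split, and the two halves are built once at the end.
import Mathlib
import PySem

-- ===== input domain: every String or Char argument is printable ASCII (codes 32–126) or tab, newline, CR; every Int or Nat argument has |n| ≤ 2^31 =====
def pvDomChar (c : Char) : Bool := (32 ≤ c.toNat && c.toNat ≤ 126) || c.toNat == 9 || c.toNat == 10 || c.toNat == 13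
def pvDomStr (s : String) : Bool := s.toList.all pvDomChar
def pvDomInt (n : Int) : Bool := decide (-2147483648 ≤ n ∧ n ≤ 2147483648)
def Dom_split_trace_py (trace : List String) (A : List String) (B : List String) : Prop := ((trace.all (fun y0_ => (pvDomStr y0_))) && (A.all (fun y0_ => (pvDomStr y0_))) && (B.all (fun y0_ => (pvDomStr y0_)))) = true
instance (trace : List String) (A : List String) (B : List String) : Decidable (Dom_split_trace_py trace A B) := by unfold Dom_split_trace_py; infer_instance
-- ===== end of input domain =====

-- B replaces A's quadratic scan over all split points by a single pass maintaining a
-- running prefix score (objective: faster, O(n^2) → O(n)).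

-- ===== PORT A =====
-- loop body of A's 'for i in range(len(relevant) + 1)'
def stepA (relevant : List (Int × String)) (A B : List String)
    (st : Int × List String × List String) (i : Int) : Int × List String × List String :=
  let left := (PySem.List.slice relevant none (some i)).map (·.2)
  let right := (PySem.List.slice relevant (some i) none).map (·.2)
  let t1 := left.filter (fun e => A.contains e)
  let t2 := right.filter (fun e => B.contains e)
  let kept : Int := (t1.length : Int) + (t2.length : Int)
  if kept > st.1 then (kept, t1, t2) else st

def split_trace_py (trace : List String) (A : List String) (B : List String) :
    List String × List String :=
  let relevant := (PySem.List.enumerate trace 0).filter (fun p => A.contains p.2 || B.contains p.2)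
  let st := (PySem.List.pyRange 0 ((relevant.length : Int) + 1) 1).foldl
      (stepA relevant A B) (-1, [], [])
  (st.2.1, st.2.2)

-- ===== PORT B =====
-- loop body of B's 'for i, e in enumerate(rel, 1)'; state = (best_score, best_i, score)
def stepB (A B : List String) (st : Int × Int × Int) (p : Int × String) : Int × Int × Int :=
  let score := st.2.2 + (if A.contains p.2 then 1 else 0) - (if B.contains p.2 then 1 else 0)
  if score > st.1 then (score, p.1, score) else (st.1, st.2.1, score)

def split_trace_py_alt (trace : List String) (A : List String) (B : List String) :
    List String × List String :=
  let rel := trace.filter (fun e => A.contains e || B.contains e)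
  let st := (PySem.List.enumerate rel 1).foldl (stepB A B) (0, 0, 0)
  ((PySem.List.slice rel none (some st.2.1)).filter (fun e => A.contains e),
   (PySem.List.slice rel (some st.2.1) none).filter (fun e => B.contains e))

-- ===== PRECONDITION & SPEC =====
def Spec_split_trace_py (trace : List String) (A : List String) (B : List String) (out : List String × List String) : Prop := out = split_trace_py_alt trace A B
instance (trace : List String) (A : List String) (B : List String) (out : List String × List String) : Decidable (Spec_split_trace_py trace A B out) := by unfold Spec_split_trace_py; infer_instance

-- ===== CLAIM (what is proved, stated in full; the proofs are below) =====
def Claim_equal_split_trace_py : Prop := ∀ (trace : List String) (A : List String) (B : List String), Dom_split_trace_py trace A B → Spec_split_trace_py trace A B (split_trace_py trace A B)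

-- ===== LEMMAS AND PROOFS =====

-- count of elements of l satisfying p
def cnt (p : String → Bool) (l : List String) : Nat := (l.filter p).length

-- A's objective at split point m: kept A-events left of m plus kept B-events from m on
def kp (pA pB : String → Bool) (rel : List String) (m : Nat) : Int :=
  (cnt pA (rel.take m) : Int) + (cnt pB (rel.drop m) : Int)

-- B's objective: running prefix score
def sc (pA pB : String → Bool) (rel : List String) (m : Nat) : Int :=
  (cnt pA (rel.take m) : Int) - (cnt pB (rel.take m) : Int)

-- first argmax of f over 0..m, scanned left to right with strict improvement
def am (f : Nat → Int) : Nat → Nat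
  | 0 => 0
  | m + 1 => if f (m + 1) > f (am f m) then m + 1 else am f m

lemma cnt_append (p : String → Bool) (l l' : List String) :
    cnt p (l ++ l') = cnt p l + cnt p l' := by
  simp [cnt, List.filter_append]

lemma kp_eq_sc_add (pA pB : String → Bool) (rel : List String) (m : Nat) :
    kp pA pB rel m = sc pA pB rel m + (cnt pB rel : Int) := by
  have h : cnt pB (rel.take m) + cnt pB (rel.drop m) = cnt pB rel := by
    rw [← cnt_append, List.take_append_drop]
  simp only [kp, sc]
  omega

lemma am_add_const (f : Nat → Int) (c : Int) (m : Nat) :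
    am (fun k => f k + c) m = am f m := by
  induction m with
  | zero => rfl
  | succ m ih =>
    simp only [am, ih]
    by_cases h : f (m + 1) > f (am f m)
    · rw [if_pos (by omega), if_pos h]
    · rw [if_neg (by omega), if_neg h]

lemma am_kp_eq_am_sc (pA pB : String → Bool) (rel : List String) (m : Nat) :
    am (kp pA pB rel) m = am (sc pA pB rel) m := by
  have h : kp pA pB rel = fun k => sc pA pB rel k + (cnt pB rel : Int) := by
    funext k; exact kp_eq_sc_add pA pB rel k
  rw [h, am_add_const]

lemma cnt_take_succ (p : String → Bool) (rel : List String) (m : Nat) (hm : m < rel.length) :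
    cnt p (rel.take (m + 1)) = cnt p (rel.take m) + (if p rel[m] then 1 else 0) := by
  rw [List.take_add_one, List.getElem?_eq_getElem hm, Option.toList_some, cnt_append]
  by_cases h : p rel[m] <;> simp [cnt, List.filter, h]

-- A-side loop invariant
lemma foldA_inv (A B : List String) (relevant : List (Int × String)) (rel : List String)
    (hmap : relevant.map (·.2) = rel) (m : Nat) :
    (PySem.List.pyRange 0 ((m : Int) + 1) 1).foldl (stepA relevant A B) (-1, [], []) =
      (kp (fun e => A.contains e) (fun e => B.contains e) rel
         (am (kp (fun e => A.contains e) (fun e => B.contains e) rel) m),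
       (rel.take (am (kp (fun e => A.contains e) (fun e => B.contains e) rel) m)).filter
         (fun e => A.contains e),
       (rel.drop (am (kp (fun e => A.contains e) (fun e => B.contains e) rel) m)).filter
         (fun e => B.contains e)) := by
  induction m with
  | zero =>
    have h1 : ((0:Nat):Int) + 1 = 0 + 1 := by norm_num
    rw [h1, PySem.List.pyRange_one_singleton]
    simp only [List.foldl_cons, List.foldl_nil, stepA]
    have h0 : (0:Int) = ((0:Nat):Int) := by norm_num
    rw [h0, PySem.List.slice_to_natCast, PySem.List.slice_from_natCast]
    simp only [List.take_zero, List.drop_zero, List.map_nil, List.filter_nil, hmap,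
      List.length_nil, am, kp, cnt]
    rw [if_pos (by omega)]
  | succ m ih =>
    have hsplit : PySem.List.pyRange 0 (((m+1:Nat):Int) + 1) 1
        = PySem.List.pyRange 0 ((m:Int)+1) 1 ++ [(m:Int)+1] := by
      have h := PySem.List.pyRange_one_succ_right (a := 0) (b := (m:Int)+1) (by omega)
      have hc : ((m+1:Nat):Int) + 1 = ((m:Int)+1) + 1 := by push_cast; ring
      rw [hc, h]
    rw [hsplit, List.foldl_append, ih]
    simp only [List.foldl_cons, List.foldl_nil, stepA]
    have hc : (m:Int)+1 = ((m+1:Nat):Int) := by push_cast; ring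
    rw [hc, PySem.List.slice_to_natCast, PySem.List.slice_from_natCast,
      List.map_take, List.map_drop, hmap]
    simp only [am, kp, cnt]
    split_ifs with h1 <;> rfl

-- B-side loop invariant
lemma foldB_inv (A B : List String) (rel : List String) (m : Nat) (hm : m ≤ rel.length) :
    (PySem.List.enumerate (rel.take m) 1).foldl (stepB A B) (0, 0, 0) =
      (sc (fun e => A.contains e) (fun e => B.contains e) rel
         (am (sc (fun e => A.contains e) (fun e => B.contains e) rel) m),
       ((am (sc (fun e => A.contains e) (fun e => B.contains e) rel) m : Nat) : Int),
       sc (fun e => A.contains e) (fun e => B.contains e) rel m) := by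
  induction m with
  | zero =>
    simp [PySem.List.enumerate_nil, sc, cnt, am]
  | succ m ih =>
    have hm' : m < rel.length := by omega
    rw [List.take_add_one, List.getElem?_eq_getElem hm', Option.toList_some,
      PySem.List.enumerate_append, List.foldl_append, ih (by omega)]
    have hlen : (rel.take m).length = m := by
      rw [List.length_take]; omega
    rw [hlen]
    simp only [PySem.List.enumerate_cons, PySem.List.enumerate_nil, List.foldl_cons,
      List.foldl_nil, stepB]
    have hA := cnt_take_succ (fun e => A.contains e) rel m hm'
    have hB := cnt_take_succ (fun e => B.contains e) rel m hm'
    have hs : sc (fun e => A.contains e) (fun e => B.contains e) rel (m+1) =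
        sc (fun e => A.contains e) (fun e => B.contains e) rel m +
          (if A.contains rel[m] then 1 else 0) - (if B.contains rel[m] then 1 else 0) := by
      simp only [sc, hA, hB]
      split_ifs <;> push_cast <;> ring
    rw [← hs]
    simp only [am]
    have hc : (1:Int) + (m:Int) = ((m+1:Nat):Int) := by push_cast; ring
    split_ifs with h1
    · rw [hc]
    · rfl

-- ===== VERDICT (by name: the statement is the Claim_ definition above) =====
theorem split_trace_py_spec : Claim_equal_split_trace_py := by
  intro trace A B _
  show split_trace_py trace A B = split_trace_py_alt trace A B
  have hmap : ((PySem.List.enumerate trace 0).filter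
        (fun p => A.contains p.2 || B.contains p.2)).map (·.2)
      = trace.filter (fun e => A.contains e || B.contains e) := by
    conv_rhs => rw [← PySem.List.map_snd_enumerate trace (0:Int)]
    exact (List.filter_map (f := fun x : Int × String => x.2) (p := fun e => A.contains e || B.contains e) (l := PySem.List.enumerate trace 0)).symm
  have hlen : ((PySem.List.enumerate trace 0).filter
        (fun p => A.contains p.2 || B.contains p.2)).length
      = (trace.filter (fun e => A.contains e || B.contains e)).length := by
    have h := congrArg List.length hmap
    simpa using h
  have hB := foldB_inv A B (trace.filter (fun e => A.contains e || B.contains e))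
      (trace.filter (fun e => A.contains e || B.contains e)).length (le_refl _)
  rw [List.take_length] at hB
  simp only [split_trace_py, split_trace_py_alt]
  rw [hlen, foldA_inv A B _ _ hmap, hB]
  rw [am_kp_eq_am_sc]
  rw [PySem.List.slice_to_natCast, PySem.List.slice_from_natCast]
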